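-- pv_equiv track=rewrite | github.com/ggeerraarrdd/lafs-dev | form.py | get_dicts
-- ===== SOURCE A (Python) =====
-- def get_dicts(post):
--
--     keys_series = [
--         "new_series_semester",
--         "new_series_year",
--         "new_series_title",
--         "new_series_brief",
--         "new_series_poster"
--     ]
--
--     keys_schedule = [
--         "id",
--         "schedule"
--         ]
--
--     keys_films = [
--         "id",
--         "film_title",
--         "film_director",
--         "film_year",
--         "film_runtime",
--         "film_description",
--         "wiki",
--         "note"
--         ]
--
--     keys_colors = [
--         "color1",
--         "color2",
--         "color3"
--         ]
--
--     # PART 1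
--     # Create series dict
--     dict_series = {k.lstrip('new_'): post[k] for k in keys_series if k in post}
--
--     # INTERIM
--     # Process post to create dictionary for schedule and films keys
--     dict_all = {}
--
--     for key, value in post.items():
--         if key not in keys_series and key not in keys_colors:
--             num = 'film' + key[-1]
--             if key[-2].isdigit():
--                 num = 'film' + key[-2:]
--                 key = key.rstrip('0123456789')
--             if num not in dict_all:
--                 dict_all[num] = {}
--             key = key.rstrip('0123456789')
--             dict_all[num][key] = value
--
--     # PART 2
--     # Only schedule keys in dict_all
--     dict_schedule = {}
--
--     for key, value in dict_all.items():
--         film_values = {}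
--         for k, v in value.items():
--             if k in keys_schedule:
--                 film_values[k] = v
--         dict_schedule[key] = film_values
--
--     # PART 3
--     # Only film keys in dict_all
--     dict_films = {}
--
--     for key, value in dict_all.items():
--         film_values = {}
--         for k, v in value.items():
--             if k in keys_films:
--                 film_values[k] = v
--         dict_films[key] = film_values
--
--     # PART 4
--     # Create films dict
--     dict_colors = {k: post[k] for k in keys_colors if k in post}
--
--     # RETURN
--     return dict_series, dict_schedule, dict_films, dict_colors
-- ===== SOURCE B (Python) =====
-- def get_dicts(post):
--     keys_series = [
--         "new_series_semester",
--         "new_series_year",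
--         "new_series_title",
--         "new_series_brief",
--         "new_series_poster"
--     ]
--     keys_schedule = ["id", "schedule"]
--     keys_films = [
--         "id",
--         "film_title",
--         "film_director",
--         "film_year",
--         "film_runtime",
--         "film_description",
--         "wiki",
--         "note"
--     ]
--     keys_colors = ["color1", "color2", "color3"]
--
--     dict_series = {k.lstrip('new_'): post[k] for k in keys_series if k in post}
--     dict_colors = {k: post[k] for k in keys_colors if k in post}
--
--     # One direct pass: no intermediate dict_all, schedule and films filled together.
--     dict_schedule = {}
--     dict_films = {}
--     for key, value in post.items():
--         if key in keys_series or key in keys_colors: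
--             continue
--         num = 'film' + (key[-2:] if key[-2].isdigit() else key[-1])
--         k = key.rstrip('0123456789')
--         if num not in dict_schedule:
--             dict_schedule[num] = {}
--             dict_films[num] = {}
--         if k in keys_schedule:
--             dict_schedule[num][k] = value
--         if k in keys_films:
--             dict_films[num][k] = value
--
--     return dict_series, dict_schedule, dict_films, dict_colors
-- ===== Notes on version B (the rewrite author's own statement) =====
-- stated objective: simpler
-- what changed: B drops A's intermediate dict_all and its two separate filtering re-scans: one direct pass over post.items() fills dict_schedule and dict_films together (initialising both on first sight of each film number), with dict_series/dict_colors built by the same comprehensions.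
import Mathlib
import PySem

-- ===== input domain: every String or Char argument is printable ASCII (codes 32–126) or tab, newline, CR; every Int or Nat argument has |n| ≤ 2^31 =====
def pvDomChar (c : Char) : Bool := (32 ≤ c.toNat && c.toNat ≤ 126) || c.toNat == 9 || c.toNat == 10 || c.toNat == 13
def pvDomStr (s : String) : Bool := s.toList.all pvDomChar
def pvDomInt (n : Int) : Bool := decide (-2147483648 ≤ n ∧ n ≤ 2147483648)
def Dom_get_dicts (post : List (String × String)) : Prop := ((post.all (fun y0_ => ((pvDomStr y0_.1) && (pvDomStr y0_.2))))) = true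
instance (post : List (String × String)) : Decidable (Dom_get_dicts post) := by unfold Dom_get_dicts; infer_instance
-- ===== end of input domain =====

-- B replaces A's intermediate dict_all and its two filtering re-scans by one direct pass that
-- fills dict_schedule and dict_films together (objective: simpler decomposition, same cost).

-- Exact hand port of Python str.lstrip(chars)/str.rstrip(chars) (chars acts as a character SET;
-- exact on ASCII); PySem only provides the whitespace and the symmetric strip(chars) forms.
def pyLstripChars (s : String) (chars : List Char) : String :=
  String.ofList (s.toList.dropWhile (fun c => chars.contains c))

def pyRstripChars (s : String) (chars : List Char) : String :=
  String.ofList ((s.toList.reverse.dropWhile (fun c => chars.contains c)).reverse)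

def pvDigits : List Char := ['0','1','2','3','4','5','6','7','8','9']

-- ===== PORT A =====
def get_dicts (post : List (String × String)) : (List (String × String)) × (List (String × List (String × String))) × (List (String × List (String × String))) × (List (String × String)) :=
  let d := PySem.Dict.ofList post            -- the Python argument is a dict
  let keys_series : List String :=
    ["new_series_semester", "new_series_year", "new_series_title", "new_series_brief", "new_series_poster"]
  let keys_schedule : List String := ["id", "schedule"]
  let keys_films : List String :=
    ["id", "film_title", "film_director", "film_year", "film_runtime", "film_description", "wiki", "note"]
  let keys_colors : List String := ["color1", "color2", "color3"]
  -- PART 1: {k.lstrip('new_'): post[k] for k in keys_series if k in post}  (post[k] guarded by the membership test)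
  let dict_series : PySem.Dict String String :=
    keys_series.foldl (fun acc k =>
      if d.contains k then acc.insert (pyLstripChars k ['n','e','w','_']) (d.getD k "") else acc)
      PySem.Dict.empty
  -- INTERIM: build dict_all
  let dict_all : PySem.Dict String (PySem.Dict String String) :=
    d.items.foldl (fun da kv =>
      let key := kv.1
      let value := kv.2
      if keys_series.contains key || keys_colors.contains key then da
      else
        -- num = 'film' + key[-1]; if key[-2].isdigit(): num = 'film' + key[-2:]; key = key.rstrip('0123456789')
        -- (key[-1] / key[-2] raise IndexError on short keys: excluded by Pre_, the port defaults to ' ')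
        let num := "film" ++ String.ofList [(PySem.List.pyGet? key.toList (-1)).getD ' ']
        let nk :=
          if PySem.Chars.isdigit ((PySem.List.pyGet? key.toList (-2)).getD ' ') then
            ("film" ++ String.ofList (PySem.List.slice key.toList (some (-2)) none), pyRstripChars key pvDigits)
          else (num, key)
        let da := if da.contains nk.1 = false then da.insert nk.1 PySem.Dict.empty else da
        let key2 := pyRstripChars nk.2 pvDigits
        da.insert nk.1 ((da.getD nk.1 PySem.Dict.empty).insert key2 value))
      PySem.Dict.empty
  -- PART 2: only schedule keys of dict_all
  let dict_schedule : PySem.Dict String (PySem.Dict String String) :=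
    dict_all.items.foldl (fun ds kv =>
      ds.insert kv.1
        (kv.2.items.foldl (fun fv p => if keys_schedule.contains p.1 then fv.insert p.1 p.2 else fv)
          PySem.Dict.empty))
      PySem.Dict.empty
  -- PART 3: only film keys of dict_all
  let dict_films : PySem.Dict String (PySem.Dict String String) :=
    dict_all.items.foldl (fun ds kv =>
      ds.insert kv.1
        (kv.2.items.foldl (fun fv p => if keys_films.contains p.1 then fv.insert p.1 p.2 else fv)
          PySem.Dict.empty))
      PySem.Dict.empty
  -- PART 4
  let dict_colors : PySem.Dict String String :=
    keys_colors.foldl (fun acc k => if d.contains k then acc.insert k (d.getD k "") else acc)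
      PySem.Dict.empty
  (dict_series.items,
   dict_schedule.items.map (fun p => (p.1, p.2.items)),
   dict_films.items.map (fun p => (p.1, p.2.items)),
   dict_colors.items)

-- ===== PORT B =====
def get_dicts_alt (post : List (String × String)) : (List (String × String)) × (List (String × List (String × String))) × (List (String × List (String × String))) × (List (String × String)) :=
  let d := PySem.Dict.ofList post
  let keys_series : List String :=
    ["new_series_semester", "new_series_year", "new_series_title", "new_series_brief", "new_series_poster"]
  let keys_schedule : List String := ["id", "schedule"]
  let keys_films : List String :=
    ["id", "film_title", "film_director", "film_year", "film_runtime", "film_description", "wiki", "note"]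
  let keys_colors : List String := ["color1", "color2", "color3"]
  let dict_series : PySem.Dict String String :=
    keys_series.foldl (fun acc k =>
      if d.contains k then acc.insert (pyLstripChars k ['n','e','w','_']) (d.getD k "") else acc)
      PySem.Dict.empty
  let dict_colors : PySem.Dict String String :=
    keys_colors.foldl (fun acc k => if d.contains k then acc.insert k (d.getD k "") else acc)
      PySem.Dict.empty
  -- one direct pass: schedule and films filled together, no dict_all
  let sf : PySem.Dict String (PySem.Dict String String) × PySem.Dict String (PySem.Dict String String) :=
    d.items.foldl (fun sf kv =>
      let key := kv.1
      let value := kv.2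
      if keys_series.contains key || keys_colors.contains key then sf
      else
        let num := "film" ++
          (if PySem.Chars.isdigit ((PySem.List.pyGet? key.toList (-2)).getD ' ') then
             String.ofList (PySem.List.slice key.toList (some (-2)) none)
           else String.ofList [(PySem.List.pyGet? key.toList (-1)).getD ' '])
        let k := pyRstripChars key pvDigits
        let sf := if sf.1.contains num = false then
                    (sf.1.insert num PySem.Dict.empty, sf.2.insert num PySem.Dict.empty)
                  else sf
        let ds := if keys_schedule.contains k then
                    sf.1.insert num ((sf.1.getD num PySem.Dict.empty).insert k value)
                  else sf.1
        let df := if keys_films.contains k then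
                    sf.2.insert num ((sf.2.getD num PySem.Dict.empty).insert k value)
                  else sf.2
        (ds, df))
      (PySem.Dict.empty, PySem.Dict.empty)
  (dict_series.items,
   sf.1.items.map (fun p => (p.1, p.2.items)),
   sf.2.items.map (fun p => (p.1, p.2.items)),
   dict_colors.items)

-- ===== PRECONDITION & SPEC =====
-- Pre_ excludes exactly the inputs on which the Python A raises IndexError: a post key of length
-- < 2 that is in neither keys_series nor keys_colors reaches key[-1] / key[-2].
def Pre_get_dicts (post : List (String × String)) : Prop :=
  ∀ p ∈ post,
    p.1 ∉ (["new_series_semester", "new_series_year", "new_series_title", "new_series_brief", "new_series_poster"] : List String) →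
    p.1 ∉ (["color1", "color2", "color3"] : List String) →
    2 ≤ p.1.toList.length
instance (post : List (String × String)) : Decidable (Pre_get_dicts post) := by
  unfold Pre_get_dicts; infer_instance

def pvWitness_get_dicts : (List (String × String)) :=
  [("new_series_title", "Noir"), ("id1", "5"), ("schedule1", "Mon"), ("film_title1", "M"), ("color1", "red")]

def Spec_get_dicts (post : List (String × String)) (out : (List (String × String)) × (List (String × List (String × String))) × (List (String × List (String × String))) × (List (String × String))) : Prop := out = get_dicts_alt post
instance (post : List (String × String)) (out : (List (String × String)) × (List (String × List (String × String))) × (List (String × List (String × String))) × (List (String × String))) : Decidable (Spec_get_dicts post out) := by unfold Spec_get_dicts; infer_instance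

-- ===== CLAIM (what is proved, stated in full; the proofs are below) =====
def Claim_equal_get_dicts : Prop := ∀ (post : List (String × String)), Dom_get_dicts post → Pre_get_dicts post → Spec_get_dicts post (get_dicts post)

-- ===== LEMMAS AND PROOFS =====

-- Named copies of the pieces of the two ports (definitionally equal to them; used only by the proofs).
def pvKSer : List String :=
  ["new_series_semester", "new_series_year", "new_series_title", "new_series_brief", "new_series_poster"]
def pvKSch : List String := ["id", "schedule"]
def pvKFilm : List String :=
  ["id", "film_title", "film_director", "film_year", "film_runtime", "film_description", "wiki", "note"]
def pvKCol : List String := ["color1", "color2", "color3"]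

def pvAstep (da : PySem.Dict String (PySem.Dict String String)) (kv : String × String) :
    PySem.Dict String (PySem.Dict String String) :=
  let key := kv.1
  let value := kv.2
  if pvKSer.contains key || pvKCol.contains key then da
  else
    let num := "film" ++ String.ofList [(PySem.List.pyGet? key.toList (-1)).getD ' ']
    let nk :=
      if PySem.Chars.isdigit ((PySem.List.pyGet? key.toList (-2)).getD ' ') then
        ("film" ++ String.ofList (PySem.List.slice key.toList (some (-2)) none), pyRstripChars key pvDigits)
      else (num, key)
    let da := if da.contains nk.1 = false then da.insert nk.1 PySem.Dict.empty else da
    let key2 := pyRstripChars nk.2 pvDigits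
    da.insert nk.1 ((da.getD nk.1 PySem.Dict.empty).insert key2 value)

def pvBstep (sf : PySem.Dict String (PySem.Dict String String) × PySem.Dict String (PySem.Dict String String))
    (kv : String × String) :
    PySem.Dict String (PySem.Dict String String) × PySem.Dict String (PySem.Dict String String) :=
  let key := kv.1
  let value := kv.2
  if pvKSer.contains key || pvKCol.contains key then sf
  else
    let num := "film" ++
      (if PySem.Chars.isdigit ((PySem.List.pyGet? key.toList (-2)).getD ' ') then
         String.ofList (PySem.List.slice key.toList (some (-2)) none)
       else String.ofList [(PySem.List.pyGet? key.toList (-1)).getD ' '])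
    let k := pyRstripChars key pvDigits
    let sf := if sf.1.contains num = false then
                (sf.1.insert num PySem.Dict.empty, sf.2.insert num PySem.Dict.empty)
              else sf
    let ds := if pvKSch.contains k then
                sf.1.insert num ((sf.1.getD num PySem.Dict.empty).insert k value)
              else sf.1
    let df := if pvKFilm.contains k then
                sf.2.insert num ((sf.2.getD num PySem.Dict.empty).insert k value)
              else sf.2
    (ds, df)

def pvCollect (ks : List String) (da : PySem.Dict String (PySem.Dict String String)) :
    PySem.Dict String (PySem.Dict String String) :=
  da.items.foldl (fun ds kv =>
    ds.insert kv.1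
      (kv.2.items.foldl (fun fv p => if ks.contains p.1 then fv.insert p.1 p.2 else fv)
        PySem.Dict.empty))
    PySem.Dict.empty

def pvDictAll (post : List (String × String)) : PySem.Dict String (PySem.Dict String String) :=
  (PySem.Dict.ofList post).items.foldl pvAstep PySem.Dict.empty

-- the two abstractions the proof relates the ports to
def pvFilt (ks : List String) (inner : PySem.Dict String String) : PySem.Dict String String :=
  PySem.Dict.mk (inner.items.filter (fun q => ks.contains q.1))

def pvMapFilt (ks : List String) (da : PySem.Dict String (PySem.Dict String String)) :
    PySem.Dict String (PySem.Dict String String) :=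
  PySem.Dict.mk (da.items.map (fun p => (p.1, pvFilt ks p.2)))

theorem pvCharA (post : List (String × String)) :
    get_dicts post =
      ((pvKSer.foldl (fun acc k =>
          if (PySem.Dict.ofList post).contains k then
            acc.insert (pyLstripChars k ['n','e','w','_']) ((PySem.Dict.ofList post).getD k "") else acc)
          PySem.Dict.empty).items,
       (pvCollect pvKSch (pvDictAll post)).items.map (fun p => (p.1, p.2.items)),
       (pvCollect pvKFilm (pvDictAll post)).items.map (fun p => (p.1, p.2.items)),
       (pvKCol.foldl (fun acc k =>
          if (PySem.Dict.ofList post).contains k then acc.insert k ((PySem.Dict.ofList post).getD k "") else acc)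
          PySem.Dict.empty).items) := rfl

theorem pvCharB (post : List (String × String)) :
    get_dicts_alt post =
      ((pvKSer.foldl (fun acc k =>
          if (PySem.Dict.ofList post).contains k then
            acc.insert (pyLstripChars k ['n','e','w','_']) ((PySem.Dict.ofList post).getD k "") else acc)
          PySem.Dict.empty).items,
       ((PySem.Dict.ofList post).items.foldl pvBstep (PySem.Dict.empty, PySem.Dict.empty)).1.items.map
         (fun p => (p.1, p.2.items)),
       ((PySem.Dict.ofList post).items.foldl pvBstep (PySem.Dict.empty, PySem.Dict.empty)).2.items.map
         (fun p => (p.1, p.2.items)),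
       (pvKCol.foldl (fun acc k =>
          if (PySem.Dict.ofList post).contains k then acc.insert k ((PySem.Dict.ofList post).getD k "") else acc)
          PySem.Dict.empty).items) := rfl

-- basic facts about pvFilt / pvMapFilt
theorem pvFilt_empty (ks : List String) : pvFilt ks PySem.Dict.empty = PySem.Dict.empty := rfl

theorem pvMapFilt_contains (ks : List String) (da : PySem.Dict String (PySem.Dict String String)) (num : String) :
    (pvMapFilt ks da).contains num = da.contains num := by
  simp [pvMapFilt, PySem.Dict.contains, List.any_map, Function.comp_def]

theorem pvMapFilt_keys (ks : List String) (da : PySem.Dict String (PySem.Dict String String)) :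
    (pvMapFilt ks da).keys = da.keys := by
  simp [pvMapFilt, PySem.Dict.keys, List.map_map, Function.comp_def]

theorem pvMapFilt_get? (ks : List String) (da : PySem.Dict String (PySem.Dict String String)) (num : String) :
    (pvMapFilt ks da).get? num = Option.map (pvFilt ks) (da.get? num) := by
  simp [pvMapFilt, PySem.Dict.get?, List.find?_map, Function.comp_def, Option.map_map]

theorem pvMapFilt_insert (ks : List String) (da : PySem.Dict String (PySem.Dict String String))
    (num : String) (x : PySem.Dict String String) :
    pvMapFilt ks (da.insert num x) = (pvMapFilt ks da).insert num (pvFilt ks x) := by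
  by_cases h : da.contains num = true
  · have h' : (pvMapFilt ks da).contains num = true := by rw [pvMapFilt_contains]; exact h
    apply PySem.Dict.ext
    rw [PySem.Dict.items_insert_of_contains _ _ h']
    simp only [pvMapFilt, PySem.Dict.items_insert_of_contains _ _ h, List.map_map]
    apply List.map_congr_left
    intro p _
    by_cases hk : p.1 = num <;> simp [hk]
  · have h' : (pvMapFilt ks da).contains num = false := by rw [pvMapFilt_contains]; simpa using h
    apply PySem.Dict.ext
    rw [PySem.Dict.items_insert_of_not_contains _ _ h']
    simp [pvMapFilt, PySem.Dict.items_insert_of_not_contains _ _ (by simpa using h)]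

theorem pvFilt_key_any (f : String → Bool) (k : String) (l : List (String × String))
    (hk : f k = true) :
    ((l.filter (fun q => f q.1)).any (fun p => p.1 == k)) = l.any (fun p => p.1 == k) := by
  induction l with
  | nil => rfl
  | cons p t ih =>
    by_cases h1 : p.1 = k
    · simp [h1, hk, ih]
    · by_cases h2 : f p.1 = true <;> simp [h1, h2, ih]

theorem pvFilt_contains (ks : List String) (inner : PySem.Dict String String) (k : String)
    (hk : ks.contains k = true) : (pvFilt ks inner).contains k = inner.contains k := by
  simpa [pvFilt, PySem.Dict.contains] using
    pvFilt_key_any (fun s => ks.contains s) k inner.items hk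

theorem pvFilt_map_ow_in (f : String → Bool) (k v : String) (l : List (String × String))
    (hk : f k = true) :
    ((l.map (fun p => if p.1 = k then (k, v) else p)).filter (fun q => f q.1))
      = (l.filter (fun q => f q.1)).map (fun p => if p.1 = k then (k, v) else p) := by
  induction l with
  | nil => rfl
  | cons p t ih =>
    by_cases h1 : p.1 = k
    · simp [h1, hk, ih]
    · by_cases h2 : f p.1 = true <;> simp [h1, h2, ih]

theorem pvFilt_map_ow_out (f : String → Bool) (k v : String) (l : List (String × String))
    (hk : f k = false) :
    ((l.map (fun p => if p.1 = k then (k, v) else p)).filter (fun q => f q.1))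
      = l.filter (fun q => f q.1) := by
  induction l with
  | nil => rfl
  | cons p t ih =>
    by_cases h1 : p.1 = k
    · simp [h1, hk, ih]
    · by_cases h2 : f p.1 = true <;> simp [h1, h2, ih]

theorem pvFilt_insert (ks : List String) (inner : PySem.Dict String String) (k v : String) :
    pvFilt ks (inner.insert k v) =
      if ks.contains k then (pvFilt ks inner).insert k v else pvFilt ks inner := by
  by_cases hk : ks.contains k = true
  · simp only [hk, if_true]
    by_cases h : inner.contains k = true
    · have h' : (pvFilt ks inner).contains k = true := by rw [pvFilt_contains _ _ _ hk]; exact h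
      apply PySem.Dict.ext
      rw [PySem.Dict.items_insert_of_contains _ _ h']
      simpa [pvFilt, PySem.Dict.items_insert_of_contains _ _ h] using
        pvFilt_map_ow_in (fun s => ks.contains s) k v inner.items hk
    · have h' : (pvFilt ks inner).contains k = false := by rw [pvFilt_contains _ _ _ hk]; simpa using h
      apply PySem.Dict.ext
      rw [PySem.Dict.items_insert_of_not_contains _ _ h']
      simp only [pvFilt, PySem.Dict.items_insert_of_not_contains _ _ (by simpa using h),
        List.filter_append, List.filter_cons, List.filter_nil, hk, if_true]
  · have hk' : ks.contains k = false := by simpa using hk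
    simp only [hk', Bool.false_eq_true, if_false]
    by_cases h : inner.contains k = true
    · apply PySem.Dict.ext
      simpa [pvFilt, PySem.Dict.items_insert_of_contains _ _ h] using
        pvFilt_map_ow_out (fun s => ks.contains s) k v inner.items hk'
    · apply PySem.Dict.ext
      simp only [pvFilt, PySem.Dict.items_insert_of_not_contains _ _ (by simpa using h),
        List.filter_append, List.filter_cons, List.filter_nil, hk', Bool.false_eq_true, if_false,
        List.append_nil]

-- insert of the value already stored at k is a no-op (keys unique)
theorem pvInsert_self {ν : Type} (d : PySem.Dict String ν) (k : String) (v : ν)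
    (hnd : d.keys.Nodup) (h : d.get? k = some v) : d.insert k v = d := by
  have hc : d.contains k = true := by rw [PySem.Dict.contains_eq_isSome_get?, h]; rfl
  have hmem : (k, v) ∈ d.items := PySem.Dict.mem_items_of_get?_eq_some _ h
  apply PySem.Dict.ext
  rw [PySem.Dict.items_insert_of_contains _ _ hc]
  have hinj := List.inj_on_of_nodup_map (f := Prod.fst) hnd
  conv_rhs => rw [← List.map_id d.items]
  apply List.map_congr_left
  intro p hp
  by_cases h1 : p.1 = k
  · have : p = (k, v) := hinj hp hmem h1
    simp [this]
  · simp [h1]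

theorem pvRstrip_idem (s : String) (c : List Char) :
    pyRstripChars (pyRstripChars s c) c = pyRstripChars s c := by
  simp [pyRstripChars, List.dropWhile_idempotent]

theorem pvEnsure_inv (da : PySem.Dict String (PySem.Dict String String)) (num key2 : String)
    (value : String) (hnd : da.keys.Nodup) (hin : ∀ p ∈ da.items, p.2.keys.Nodup) :
    (((if da.contains num = false then da.insert num PySem.Dict.empty else da).insert num
        (((if da.contains num = false then da.insert num PySem.Dict.empty else da).getD num
            PySem.Dict.empty).insert key2 value)).keys.Nodup ∧
     ∀ p ∈ ((if da.contains num = false then da.insert num PySem.Dict.empty else da).insert num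
        (((if da.contains num = false then da.insert num PySem.Dict.empty else da).getD num
            PySem.Dict.empty).insert key2 value)).items, p.2.keys.Nodup) := by
  set da1 := if da.contains num = false then da.insert num PySem.Dict.empty else da with hda1
  have hnd1 : da1.keys.Nodup := by
    rw [hda1]; split
    · exact PySem.Dict.nodup_keys_insert _ _ _ hnd
    · exact hnd
  have hin1 : ∀ p ∈ da1.items, p.2.keys.Nodup := by
    rw [hda1]; split
    · intro p hp
      rw [PySem.Dict.mem_items_insert] at hp
      rcases hp with rfl | ⟨hp, -⟩
      · simp [PySem.Dict.empty, PySem.Dict.keys]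
      · exact hin p hp
    · exact hin
  have hinner : (da1.getD num PySem.Dict.empty).keys.Nodup := by
    rw [PySem.Dict.getD_eq_get?_getD]
    rcases hg : da1.get? num with - | w
    · simp [PySem.Dict.empty, PySem.Dict.keys]
    · exact hin1 _ (PySem.Dict.mem_items_of_get?_eq_some _ hg)
  refine ⟨PySem.Dict.nodup_keys_insert _ _ _ hnd1, ?_⟩
  intro p hp
  rw [PySem.Dict.mem_items_insert] at hp
  rcases hp with rfl | ⟨hp, -⟩
  · exact PySem.Dict.nodup_keys_insert _ _ _ hinner
  · exact hin1 p hp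

theorem pvAstep_inv (da : PySem.Dict String (PySem.Dict String String)) (kv : String × String)
    (hnd : da.keys.Nodup) (hin : ∀ p ∈ da.items, p.2.keys.Nodup) :
    (pvAstep da kv).keys.Nodup ∧ ∀ p ∈ (pvAstep da kv).items, p.2.keys.Nodup := by
  simp only [pvAstep]
  split
  · exact ⟨hnd, hin⟩
  · exact pvEnsure_inv da _ _ _ hnd hin

theorem pvFold_inv (l : List (String × String)) :
    ∀ da : PySem.Dict String (PySem.Dict String String), da.keys.Nodup →
      (∀ p ∈ da.items, p.2.keys.Nodup) →
      ((l.foldl pvAstep da).keys.Nodup ∧ ∀ p ∈ (l.foldl pvAstep da).items, p.2.keys.Nodup) := by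
  induction l with
  | nil => intro da hnd hin; exact ⟨hnd, hin⟩
  | cons kv t ih =>
    intro da hnd hin
    have h := pvAstep_inv da kv hnd hin
    exact ih _ h.1 h.2

theorem pvStepCore (ks : List String) (da1 : PySem.Dict String (PySem.Dict String String))
    (num k v : String) (hnd1 : da1.keys.Nodup) (hc1 : da1.contains num = true) :
    (if ks.contains k then
        (pvMapFilt ks da1).insert num
          (((pvMapFilt ks da1).getD num PySem.Dict.empty).insert k v)
      else pvMapFilt ks da1)
      = pvMapFilt ks (da1.insert num ((da1.getD num PySem.Dict.empty).insert k v)) := by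
  have hg : da1.get? num = some (da1.getD num PySem.Dict.empty) := by
    rw [PySem.Dict.getD_eq_get?_getD]
    rcases hg0 : da1.get? num with - | w
    · rw [PySem.Dict.contains_eq_isSome_get?, hg0] at hc1; simp at hc1
    · rfl
  have hds : (pvMapFilt ks da1).getD num PySem.Dict.empty
      = pvFilt ks (da1.getD num PySem.Dict.empty) := by
    rw [PySem.Dict.getD_eq_get?_getD, pvMapFilt_get?, hg]; rfl
  rw [pvMapFilt_insert, pvFilt_insert]
  by_cases hk : ks.contains k = true
  · simp only [hk, if_true]
    rw [hds]
  · have hk' : ks.contains k = false := by simpa using hk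
    simp only [hk', Bool.false_eq_true, if_false]
    symm
    apply pvInsert_self
    · rw [pvMapFilt_keys]; exact hnd1
    · rw [pvMapFilt_get?, hg]; rfl

theorem pvMapFilt_insert_empty (ks : List String) (da : PySem.Dict String (PySem.Dict String String))
    (num : String) :
    (pvMapFilt ks da).insert num PySem.Dict.empty = pvMapFilt ks (da.insert num PySem.Dict.empty) := by
  rw [pvMapFilt_insert, pvFilt_empty]

theorem pvBstep_eq (da : PySem.Dict String (PySem.Dict String String)) (kv : String × String)
    (hnd : da.keys.Nodup) :
    pvBstep (pvMapFilt pvKSch da, pvMapFilt pvKFilm da) kv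
      = (pvMapFilt pvKSch (pvAstep da kv), pvMapFilt pvKFilm (pvAstep da kv)) := by
  simp only [pvBstep, pvAstep]
  by_cases hskip : (pvKSer.contains kv.1 || pvKCol.contains kv.1) = true
  · simp only [hskip, if_true]
  · simp only [hskip, Bool.false_eq_true, if_false]
    by_cases hdig : PySem.Chars.isdigit ((PySem.List.pyGet? kv.1.toList (-2)).getD ' ') = true
    · simp only [hdig, if_true]
      rw [pvRstrip_idem, pvMapFilt_contains]
      by_cases hc : da.contains ("film" ++ String.ofList (PySem.List.slice kv.1.toList (some (-2)) none)) = false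
      · rw [if_pos hc, if_pos hc]
        simp only [pvMapFilt_insert_empty, Prod.mk.injEq]
        constructor
        · exact pvStepCore _ _ _ _ _ (PySem.Dict.nodup_keys_insert _ _ _ hnd)
            (PySem.Dict.contains_insert_self _ _ _)
        · exact pvStepCore _ _ _ _ _ (PySem.Dict.nodup_keys_insert _ _ _ hnd)
            (PySem.Dict.contains_insert_self _ _ _)
      · rw [if_neg hc, if_neg hc]
        have hc' : da.contains ("film" ++ String.ofList (PySem.List.slice kv.1.toList (some (-2)) none)) = true := by
          cases h : da.contains ("film" ++ String.ofList (PySem.List.slice kv.1.toList (some (-2)) none))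
          · exact absurd h hc
          · rfl
        simp only [Prod.mk.injEq]
        exact ⟨pvStepCore _ _ _ _ _ hnd hc', pvStepCore _ _ _ _ _ hnd hc'⟩
    · simp only [hdig, Bool.false_eq_true, if_false]
      rw [pvMapFilt_contains]
      by_cases hc : da.contains ("film" ++ String.ofList [(PySem.List.pyGet? kv.1.toList (-1)).getD ' ']) = false
      · rw [if_pos hc, if_pos hc]
        simp only [pvMapFilt_insert_empty, Prod.mk.injEq]
        constructor
        · exact pvStepCore _ _ _ _ _ (PySem.Dict.nodup_keys_insert _ _ _ hnd)
            (PySem.Dict.contains_insert_self _ _ _)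
        · exact pvStepCore _ _ _ _ _ (PySem.Dict.nodup_keys_insert _ _ _ hnd)
            (PySem.Dict.contains_insert_self _ _ _)
      · rw [if_neg hc, if_neg hc]
        have hc' : da.contains ("film" ++ String.ofList [(PySem.List.pyGet? kv.1.toList (-1)).getD ' ']) = true := by
          cases h : da.contains ("film" ++ String.ofList [(PySem.List.pyGet? kv.1.toList (-1)).getD ' '])
          · exact absurd h hc
          · rfl
        simp only [Prod.mk.injEq]
        exact ⟨pvStepCore _ _ _ _ _ hnd hc', pvStepCore _ _ _ _ _ hnd hc'⟩

theorem pvMain (l : List (String × String)) :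
    ∀ da : PySem.Dict String (PySem.Dict String String), da.keys.Nodup →
      (∀ p ∈ da.items, p.2.keys.Nodup) →
      l.foldl pvBstep (pvMapFilt pvKSch da, pvMapFilt pvKFilm da)
        = (pvMapFilt pvKSch (l.foldl pvAstep da), pvMapFilt pvKFilm (l.foldl pvAstep da)) := by
  induction l with
  | nil => intro da hnd hin; rfl
  | cons kv t ih =>
    intro da hnd hin
    have h := pvAstep_inv da kv hnd hin
    simp only [List.foldl_cons, pvBstep_eq da kv hnd]
    exact ih _ h.1 h.2

theorem pvMain0 (l : List (String × String)) :
    l.foldl pvBstep (PySem.Dict.empty, PySem.Dict.empty)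
      = (pvMapFilt pvKSch (l.foldl pvAstep PySem.Dict.empty),
         pvMapFilt pvKFilm (l.foldl pvAstep PySem.Dict.empty)) := by
  exact pvMain l PySem.Dict.empty (by simp [PySem.Dict.empty, PySem.Dict.keys])
    (by simp [PySem.Dict.empty])

theorem pvInnerFold (ks : List String) (inner : PySem.Dict String String)
    (h : inner.keys.Nodup) :
    inner.items.foldl (fun fv p => if ks.contains p.1 then fv.insert p.1 p.2 else fv)
      PySem.Dict.empty = pvFilt ks inner := by
  apply PySem.Dict.ext
  rw [show (inner.items.foldl (fun fv p => if ks.contains p.1 then fv.insert p.1 p.2 else fv)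
      PySem.Dict.empty)
      = ((inner.items.filter (fun q => ks.contains q.1)).foldl
          (fun fv (p : String × String) => fv.insert p.1 p.2) PySem.Dict.empty) from
    PySem.List.foldl_if_eq_foldl_filter _ _ _ _]
  have h2 : ((inner.items.filter (fun q => ks.contains q.1)).map (fun p : String × String => p.1)).Nodup := by
    refine List.Nodup.sublist ?_ h
    exact List.Sublist.map _ List.filter_sublist
  rw [PySem.Dict.items_foldl_insert_fresh (inner.items.filter (fun q => ks.contains q.1))
    (fun p => p.1) (fun p => p.2) PySem.Dict.empty (fun a _ => rfl) h2]
  simp [pvFilt, PySem.Dict.empty]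

theorem pvCollect_eq (ks : List String) (da : PySem.Dict String (PySem.Dict String String))
    (hnd : da.keys.Nodup) (hin : ∀ p ∈ da.items, p.2.keys.Nodup) :
    pvCollect ks da = pvMapFilt ks da := by
  unfold pvCollect
  apply PySem.Dict.ext
  rw [PySem.Dict.items_foldl_insert_fresh da.items (fun kv => kv.1)
    (fun kv => kv.2.items.foldl (fun fv p => if ks.contains p.1 then fv.insert p.1 p.2 else fv)
      PySem.Dict.empty) PySem.Dict.empty (fun a _ => rfl) hnd]
  simp only [pvMapFilt]
  apply List.map_congr_left
  intro p hp
  exact congrArg (Prod.mk p.1) (pvInnerFold ks p.2 (hin p hp))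

theorem get_dicts_spec : Claim_equal_get_dicts := by
  intro post _ _
  unfold Spec_get_dicts
  rw [pvCharA, pvCharB]
  have hD := pvFold_inv (PySem.Dict.ofList post).items PySem.Dict.empty
    (by simp [PySem.Dict.empty, PySem.Dict.keys]) (by simp [PySem.Dict.empty])
  rw [pvCollect_eq pvKSch (pvDictAll post) hD.1 hD.2,
    pvCollect_eq pvKFilm (pvDictAll post) hD.1 hD.2, pvMain0]
  rfl
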